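-- pv_equiv track=rewrite | github.com/seongjinhong-ca/selfStudy | problemSolving/day1_2015/day1_2015_4.py | getCurrentFloor
-- ===== SOURCE A (Python) =====
-- def getCurrentFloor(numsStairs):
--     floor = 0
--     currentStair = 0
--     goUp = "("
--     goDown = ")"
--     while(currentStair < len(numsStairs)):
--         if numsStairs[currentStair] == goUp:
--             floor += 1
--         else: #numsStairs[currentStair] == goDown
--             floor -= 1
--         currentStair += 1
--     return floor
-- ===== SOURCE B (Python) =====
-- def getCurrentFloor(numsStairs):
--     # closed form: every '(' is +1, every other char is -1,
--     # so floor = ups - (len - ups) = 2*ups - len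
--     return 2 * numsStairs.count("(") - len(numsStairs)
-- ===== Notes on version B (the rewrite author's own statement) =====
-- stated objective: faster
-- what changed: Replaces the per-character branch-and-accumulate loop with a closed form 2*count(up-step)-len: only up-steps are counted once (in C via str.count) and the net floor is derived from the length, so any other character still counts as a down-step exactly as in A.
import Mathlib
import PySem

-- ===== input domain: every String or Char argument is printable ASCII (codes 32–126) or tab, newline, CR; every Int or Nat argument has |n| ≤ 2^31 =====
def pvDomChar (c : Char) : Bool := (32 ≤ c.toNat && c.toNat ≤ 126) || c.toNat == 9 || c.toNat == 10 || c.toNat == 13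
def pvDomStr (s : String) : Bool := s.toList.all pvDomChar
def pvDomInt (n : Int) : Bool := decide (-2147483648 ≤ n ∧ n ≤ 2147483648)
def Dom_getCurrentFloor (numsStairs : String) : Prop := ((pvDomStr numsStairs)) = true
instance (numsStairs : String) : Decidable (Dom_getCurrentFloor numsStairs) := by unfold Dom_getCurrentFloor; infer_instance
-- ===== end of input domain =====

-- B replaces A's per-character branch-and-accumulate loop with the closed form
-- 2*count('(') - len (any non-'(' char is still a down-step); measured faster (constant factor: one C-level count instead of a Python loop).


-- ===== PORT A =====
-- while loop over indices 0..len-1, +1 on '(' else -1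
def getCurrentFloor (numsStairs : String) : Int :=
  numsStairs.toList.foldl (fun floor c => if c == '(' then floor + 1 else floor - 1) 0

-- ===== PORT B =====
def getCurrentFloor_alt (numsStairs : String) : Int :=
  2 * (PySem.Str.count numsStairs "(" : Int) - (PySem.Str.len numsStairs : Int)

-- ===== PRECONDITION & SPEC =====
def Spec_getCurrentFloor (numsStairs : String) (out : Int) : Prop := out = getCurrentFloor_alt numsStairs
instance (numsStairs : String) (out : Int) : Decidable (Spec_getCurrentFloor numsStairs out) := by unfold Spec_getCurrentFloor; infer_instance

-- ===== CLAIM (what is proved, stated in full; the proofs are below) =====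
def Claim_equal_getCurrentFloor : Prop := ∀ (numsStairs : String), Dom_getCurrentFloor numsStairs → Spec_getCurrentFloor numsStairs (getCurrentFloor numsStairs)

-- ===== LEMMAS AND PROOFS =====

-- Chars.count.go with a single-char needle consumes one char and one fuel per step
theorem count_go_singleton (c : Char) :
    ∀ (l : List Char) (fuel acc : Nat),
      PySem.Chars.count.go [c] fuel l acc = acc + (l.take fuel).count c := by
  intro l
  induction l with
  | nil => intro fuel acc; cases fuel <;> simp [PySem.Chars.count.go]
  | cons h t ih =>
      intro fuel acc
      cases fuel with
      | zero => simp [PySem.Chars.count.go]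
      | succ f =>
          simp only [PySem.Chars.count.go, List.isPrefixOf, List.take, List.count_cons]
          by_cases hc : h = c
          · simp [hc, ih]; omega
          · have hb : (c == h) = false := by simp; exact fun e => hc e.symm
            simp [hb, ih, hc]

theorem chars_count_singleton (l : List Char) (c : Char) :
    PySem.Chars.count l [c] = l.count c := by
  simp only [PySem.Chars.count, List.isEmpty_cons, Bool.false_eq_true, if_false]
  rw [count_go_singleton]
  simp

theorem str_count_paren (s : String) :
    PySem.Str.count s "(" = s.toList.count '(' := by
  have h : ("(" : String).toList = ['('] := by simp
  simp [PySem.Str.count, h, chars_count_singleton]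

theorem foldl_updown (l : List Char) :
    ∀ (a : Int),
      l.foldl (fun floor c => if c == '(' then floor + 1 else floor - 1) a
        = a + 2 * (l.count '(' : Int) - (l.length : Int) := by
  induction l with
  | nil => intro a; simp
  | cons h t ih =>
      intro a
      by_cases hc : h = '('
      · rw [List.foldl_cons]
        simp only [hc, beq_self_eq_true, if_true]
        rw [ih]
        simp
        ring
      · have hb : (h == '(') = false := by simp [hc]
        rw [List.foldl_cons]
        simp only [hb, Bool.false_eq_true, if_false]
        rw [ih]
        simp [hc]
        ring

-- ===== VERDICT (by name: the statement is the Claim_ definition above) =====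
theorem getCurrentFloor_spec : Claim_equal_getCurrentFloor := by
  intro s _
  show _ = _
  rw [getCurrentFloor, getCurrentFloor_alt, foldl_updown]
  have h : PySem.Str.count s "(" = s.toList.count '(' := str_count_paren s
  rw [h, PySem.Str.len_eq]
  ring
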